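-- pv_equiv track=rewrite | github.com/BobbyMartins/E2E-Task-Oriented-Dialogue-System | evaluator.py | _compute_slot_value_accuracy
-- ===== SOURCE A (Python) =====
-- from typing import Dict
--
-- def _compute_slot_value_accuracy(gold_bs: Dict, pred_bs: Dict):
--     correct, total = 0, 0
--     # Penalize both missing and extra slots
--     all_slots = set(gold_bs.keys()) | set(pred_bs.keys())
--     for k in all_slots:
--         gold_val = gold_bs.get(k)
--         pred_val = pred_bs.get(k)
--         if gold_val == pred_val and gold_val is not None:
--             correct += 1
--         total += 1
--     return correct, total
-- ===== SOURCE B (Python) =====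
-- def _compute_slot_value_accuracy(gold_bs, pred_bs):
--     # correct: only gold keys with a non-None value can ever match, so one pass over gold suffices
--     correct = sum(1 for k, v in gold_bs.items() if v is not None and pred_bs.get(k) == v)
--     # total: closed form, size of the union of the key sets
--     total = len(gold_bs.keys() | pred_bs.keys())
--     return correct, total
-- ===== Notes on version B (the rewrite author's own statement) =====
-- stated objective: simpler
-- what changed: Instead of one loop over the union of keys incrementing correct and total, B computes total in closed form as the size of the key-set union and counts correct by a single comprehension over gold items only (only non-None gold values can match); Pre_ excludes association lists whose gold part has duplicate keys, which do not represent a Python dict (A's parameter type) and on which A, fed the raw list, raises.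
import Mathlib
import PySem

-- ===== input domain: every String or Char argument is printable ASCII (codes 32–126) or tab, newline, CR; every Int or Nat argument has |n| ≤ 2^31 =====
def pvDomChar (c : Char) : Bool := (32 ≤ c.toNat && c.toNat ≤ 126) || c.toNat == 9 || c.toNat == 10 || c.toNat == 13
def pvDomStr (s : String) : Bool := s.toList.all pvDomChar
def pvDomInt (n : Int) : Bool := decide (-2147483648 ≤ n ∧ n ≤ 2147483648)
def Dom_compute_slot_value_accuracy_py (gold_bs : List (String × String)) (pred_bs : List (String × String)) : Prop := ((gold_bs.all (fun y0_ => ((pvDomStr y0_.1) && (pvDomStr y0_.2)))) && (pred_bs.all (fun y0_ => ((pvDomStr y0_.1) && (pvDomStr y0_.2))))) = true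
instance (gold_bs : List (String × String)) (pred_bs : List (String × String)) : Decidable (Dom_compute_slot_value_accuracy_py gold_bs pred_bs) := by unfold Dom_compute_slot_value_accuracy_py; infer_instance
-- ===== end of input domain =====

-- B computes total in closed form (size of the key-set union) and counts correct by one pass over gold only; simpler decomposition, same cost.


-- ===== PORT A =====
-- for k in all_slots: gold_val/pred_val via dict .get; correct += 1 on match-and-not-None; total += 1
def compute_slot_value_accuracy_py (gold_bs : List (String × String)) (pred_bs : List (String × String)) : Int × Int :=
  let goldD : PySem.Dict String String := PySem.Dict.mk gold_bs
  let predD : PySem.Dict String String := PySem.Dict.mk pred_bs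
  -- all_slots = set(gold_bs.keys()) | set(pred_bs.keys()); iterated only for order-independent counting
  let all_slots : PySem.Set String :=
    PySem.Set.union (PySem.Set.ofList goldD.keys) (PySem.Set.ofList predD.keys)
  all_slots.foldl
    (fun (ct : Int × Int) k =>
      let gold_val := goldD.get? k
      let pred_val := predD.get? k
      ((if gold_val == pred_val && gold_val.isSome then ct.1 + 1 else ct.1), ct.2 + 1))
    (0, 0)

-- ===== PORT B =====
def compute_slot_value_accuracy_py_alt (gold_bs : List (String × String)) (pred_bs : List (String × String)) : Int × Int :=
  let predD : PySem.Dict String String := PySem.Dict.mk pred_bs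
  -- sum(1 for k, v in gold_bs.items() if v is not None and pred_bs.get(k) == v); values are String, never None
  let correct : Int := (gold_bs.countP (fun p => predD.get? p.1 == some p.2) : Nat)
  -- len(gold_bs.keys() | pred_bs.keys())
  let total : Int :=
    ((PySem.Set.union (PySem.Set.ofList (gold_bs.map Prod.fst)) (PySem.Set.ofList (pred_bs.map Prod.fst))).length : Nat)
  (correct, total)

-- ===== PRECONDITION & SPEC =====
-- Pre_ excludes association lists whose gold part has duplicate keys: such lists do not represent
-- a Python dict (A's parameter type is a dict, whose keys are necessarily distinct), and A raises
-- (AttributeError) when handed the raw list itself.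
def Pre_compute_slot_value_accuracy_py (gold_bs : List (String × String)) (pred_bs : List (String × String)) : Prop :=
  (gold_bs.map Prod.fst).Nodup
instance (gold_bs : List (String × String)) (pred_bs : List (String × String)) : Decidable (Pre_compute_slot_value_accuracy_py gold_bs pred_bs) := by unfold Pre_compute_slot_value_accuracy_py; infer_instance
def pvWitness_compute_slot_value_accuracy_py : (List (String × String)) × (List (String × String)) :=
  ([("area", "north"), ("food", "thai")], [("area", "north"), ("price", "cheap")])
def Spec_compute_slot_value_accuracy_py (gold_bs : List (String × String)) (pred_bs : List (String × String)) (out : Int × Int) : Prop := out = compute_slot_value_accuracy_py_alt gold_bs pred_bs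
instance (gold_bs : List (String × String)) (pred_bs : List (String × String)) (out : Int × Int) : Decidable (Spec_compute_slot_value_accuracy_py gold_bs pred_bs out) := by unfold Spec_compute_slot_value_accuracy_py; infer_instance

-- ===== CLAIM (what is proved, stated in full; the proofs are below) =====
def Claim_equal_compute_slot_value_accuracy_py : Prop := ∀ (gold_bs : List (String × String)) (pred_bs : List (String × String)), Dom_compute_slot_value_accuracy_py gold_bs pred_bs → Pre_compute_slot_value_accuracy_py gold_bs pred_bs → Spec_compute_slot_value_accuracy_py gold_bs pred_bs (compute_slot_value_accuracy_py gold_bs pred_bs)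

-- ===== LEMMAS AND PROOFS =====

-- A's fold over the union list counts matches and length.
theorem pvFoldCount (q : String → Bool) (S : List String) (acc : Int × Int) :
    S.foldl (fun (ct : Int × Int) k => ((if q k then ct.1 + 1 else ct.1), ct.2 + 1)) acc
      = (acc.1 + (S.countP q : Nat), acc.2 + (S.length : Nat)) := by
  induction S generalizing acc with
  | nil => simp
  | cons x xs ih =>
      simp only [List.foldl, List.countP_cons, List.length_cons, ih]
      by_cases h : q x = true <;> simp [h, Prod.ext_iff] <;> omega

-- counting a predicate that forces membership in a nodup list gk over any nodup superlist S
-- with the same relevant members gives the same count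
theorem pvCountRestrict (q : String → Bool) (S gk : List String)
    (hS : S.Nodup) (hg : gk.Nodup)
    (hsub : ∀ k, k ∈ gk → k ∈ S)
    (hq : ∀ k, q k = true → k ∈ gk) :
    S.countP q = gk.countP q := by
  have h1 : (S.filter q).Nodup := hS.filter _
  have h2 : (gk.filter q).Nodup := hg.filter _
  have hmem : ∀ k, k ∈ S.filter q ↔ k ∈ gk.filter q := by
    intro k
    simp only [List.mem_filter]
    constructor
    · rintro ⟨_, hk⟩; exact ⟨hq k hk, hk⟩
    · rintro ⟨hk, hqk⟩
      exact ⟨hsub k hk, hqk⟩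
  have hfin : (S.filter q).toFinset = (gk.filter q).toFinset := by
    ext k; simp only [List.mem_toFinset]; exact hmem k
  have := congrArg Finset.card hfin
  rw [List.toFinset_card_of_nodup h1, List.toFinset_card_of_nodup h2] at this
  simpa [List.countP_eq_length_filter] using this

-- ===== VERDICT (by name: the statement is the Claim_ definition above) =====
theorem compute_slot_value_accuracy_py_spec : Claim_equal_compute_slot_value_accuracy_py := by
  intro gold_bs pred_bs _hdom hpre
  unfold Spec_compute_slot_value_accuracy_py
  unfold compute_slot_value_accuracy_py compute_slot_value_accuracy_py_alt
  simp only []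
  set goldD : PySem.Dict String String := PySem.Dict.mk gold_bs with hgoldD
  set predD : PySem.Dict String String := PySem.Dict.mk pred_bs with hpredD
  have hkeysg : goldD.keys = gold_bs.map Prod.fst := by
    simp [hgoldD, PySem.Dict.keys]
  have hkeysp : predD.keys = pred_bs.map Prod.fst := by
    simp [hpredD, PySem.Dict.keys]
  set gk : List String := gold_bs.map Prod.fst with hgk
  set q : String → Bool := fun k => (goldD.get? k == predD.get? k) && (goldD.get? k).isSome with hq
  set S : List String :=
    PySem.Set.union (PySem.Set.ofList gk) (PySem.Set.ofList (pred_bs.map Prod.fst)) with hSdef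
  rw [hkeysg, hkeysp]
  rw [pvFoldCount q S (0, 0)]
  have hnodupg : gk.Nodup := hpre
  have hSnodup : S.Nodup :=
    PySem.Set.nodup_union _ _ (PySem.Set.nodup_ofList _)
  -- the correct components agree
  have hqmem : ∀ k, q k = true → k ∈ gk := by
    intro k hk
    simp only [hq, Bool.and_eq_true, Option.isSome_iff_exists] at hk
    obtain ⟨-, v, hv⟩ := hk
    have : goldD.get? k ≠ none := by simp [hv]
    have := (not_iff_not.mpr (PySem.Dict.get?_eq_none_iff_not_mem_keys goldD k)).mp this
    simpa [hkeysg] using not_not.mp this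
  have hsub : ∀ k, k ∈ gk → k ∈ S := by
    intro k hk
    rw [hSdef, PySem.Set.mem_union, PySem.Set.mem_ofList]
    exact Or.inl hk
  have hcount : S.countP q = gk.countP q :=
    pvCountRestrict q S gk hSnodup hnodupg hsub hqmem
  have hgoldkeys : goldD.keys.Nodup := by rw [hkeysg]; exact hpre
  have hcount2 : gk.countP q = gold_bs.countP (fun p => predD.get? p.1 == some p.2) := by
    rw [hgk, List.countP_map]
    apply List.countP_congr
    rintro ⟨k, v⟩ hkv
    have hget : goldD.get? k = some v :=
      PySem.Dict.get?_of_mem_items goldD (by simpa [hgoldD, PySem.Dict.items] using hkv) hgoldkeys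
    simp only [Function.comp, hq, hget, Bool.and_eq_true, beq_iff_eq, Option.isSome_some,
      and_true]
    exact eq_comm
  apply Prod.ext <;> simp [hcount, hcount2]
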